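-- pv_equiv track=rewrite | github.com/swchoi1997/algorithm | BAEKJOON/2608.py | sumnum
-- ===== SOURCE A (Python) =====
-- roma1 = {'I' : 1, 'V' : 5, 'X' : 10, 'L' : 50, 'C' : 100, 'D' : 500, 'M' : 1000}
--
-- roma2 = {'IV' : 4, 'IX' : 9, 'XL' : 40, 'XC' : 90, 'CD' : 400, 'CM' : 900}
--
-- def sumnum(num1):
--     left = roma1[num1[0][0]]
--     right = roma1[num1[1][0]]
--
--     result = left + right
--     for i in range(2):
--         crt = roma1[num1[i][0]]
--         for j in range(1, len(num1[i])):
--             if roma1[num1[i][j]] <= crt: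
--                 result += roma1[num1[i][j]]
--             else:
--                 result -= crt
--                 el1 = num1[i][j-1] + num1[i][j]
--                 result += roma2[el1]
--
--             crt = roma1[num1[i][j]]
--
--     return result
-- ===== SOURCE B (Python) =====
-- roma1 = {'I': 1, 'V': 5, 'X': 10, 'L': 50, 'C': 100, 'D': 500, 'M': 1000}
--
--
-- def roman_value(s):
--     total = 0
--     for i in range(len(s)):
--         v = roma1[s[i]]
--         if i + 1 < len(s) and v < roma1[s[i + 1]]:
--             total -= v
--         else:
--             total += v
--     return total
--
--
-- def sumnum(num1):
--     return roman_value(num1[0]) + roman_value(num1[1])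
-- ===== Notes on version B (the rewrite author's own statement) =====
-- stated objective: idiomatic
-- what changed: B parses each numeral with the standard look-ahead rule (subtract a symbol when the next one is larger) using a single value table, instead of A's comparison-to-previous scan that corrects the running sum through a separate subtractive-pair dictionary.
import Mathlib
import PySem

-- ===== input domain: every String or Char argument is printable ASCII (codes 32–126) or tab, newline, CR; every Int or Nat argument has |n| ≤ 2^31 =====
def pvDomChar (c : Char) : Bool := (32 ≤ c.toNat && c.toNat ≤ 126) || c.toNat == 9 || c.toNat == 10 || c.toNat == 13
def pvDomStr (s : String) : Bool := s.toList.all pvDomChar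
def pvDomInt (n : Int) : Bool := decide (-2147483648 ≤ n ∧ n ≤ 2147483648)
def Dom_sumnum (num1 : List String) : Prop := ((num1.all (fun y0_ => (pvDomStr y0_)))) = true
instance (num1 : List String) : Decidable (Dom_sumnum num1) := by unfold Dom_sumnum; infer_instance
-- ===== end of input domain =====

-- B changes the parse to the standard single-table look-ahead rule (more idiomatic; same cost).

-- ===== PORT A =====
def roma1 : PySem.Dict Char Int :=
  PySem.Dict.ofList [('I', 1), ('V', 5), ('X', 10), ('L', 50), ('C', 100), ('D', 500), ('M', 1000)]

-- roma2, keyed by the two concatenated characters (exact: the Python key is the 2-char string prev+cur)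
def roma2 : PySem.Dict (List Char) Int :=
  PySem.Dict.ofList [(['I','V'], 4), (['I','X'], 9), (['X','L'], 40), (['X','C'], 90), (['C','D'], 400), (['C','M'], 900)]

-- roma1[c]; the default 0 is only reached outside Pre_ (Python: KeyError)
def r1 (c : Char) : Int := roma1.getD c 0

-- roma2[prev+cur]; the default 0 is only reached outside Pre_ (Python: KeyError)
def r2 (p c : Char) : Int := roma2.getD [p, c] 0

-- A's inner 'for j in range(1, len(num1[i]))' loop; crt is always roma1 of the previous char,
-- so the state carried is (previous char, result).
def loopA : List Char → Char → Int → Int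
  | [], _, result => result
  | c :: rest, prev, result =>
      let crt := r1 prev
      if r1 c ≤ crt then loopA rest c (result + r1 c)
      else loopA rest c (result - crt + r2 prev c)

-- one iteration of A's outer 'for i in range(2)' loop (crt initialised to roma1 of the first char)
def strA (s : List Char) (result : Int) : Int :=
  match s with
  | [] => result
  | c :: rest => loopA rest c result

def sumnum (num1 : List String) : Int :=
  let s0 := ((PySem.List.pyGet? num1 0).getD "").toList   -- defaults only reached outside Pre_ (IndexError)
  let s1 := ((PySem.List.pyGet? num1 1).getD "").toList
  let left := r1 (s0.headD 'I')                           -- num1[0][0]; default only outside Pre_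
  let right := r1 (s1.headD 'I')
  strA s1 (strA s0 (left + right))

-- ===== PORT B =====
-- roman_value: look-ahead loop of Source B — subtract s[i] when i+1 < len(s) and its value is smaller than s[i+1]'s
def rv : List Char → Int
  | [] => 0
  | c :: rest =>
      (match rest with
       | [] => r1 c
       | d :: _ => if r1 c < r1 d then -(r1 c) else r1 c) + rv rest

def sumnum_alt (num1 : List String) : Int :=
  rv (((PySem.List.pyGet? num1 0).getD "").toList) + rv (((PySem.List.pyGet? num1 1).getD "").toList)

-- ===== PRECONDITION & SPEC =====
-- a nonempty string of Roman symbols whose ascending adjacent pairs are all legal subtractive pairs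
def romanOk : List Char → Bool
  | [] => false
  | [c] => roma1.contains c
  | c :: d :: rest =>
      roma1.contains c && (!(r1 c < r1 d) || roma2.contains [c, d]) && romanOk (d :: rest)

-- Pre_ is exactly where A returns: ≥ 2 strings, and the first two are nonempty, use only the seven
-- Roman symbols, and every ascending adjacent pair is one of roma2's six keys (else KeyError/IndexError).
def Pre_sumnum (num1 : List String) : Prop :=
  2 ≤ num1.length ∧
  romanOk (((PySem.List.pyGet? num1 0).getD "").toList) = true ∧
  romanOk (((PySem.List.pyGet? num1 1).getD "").toList) = true
instance (num1 : List String) : Decidable (Pre_sumnum num1) := by unfold Pre_sumnum; infer_instance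

def pvWitness_sumnum : List String := ["XIV", "MCM"]

def Spec_sumnum (num1 : List String) (out : Int) : Prop := out = sumnum_alt num1
instance (num1 : List String) (out : Int) : Decidable (Spec_sumnum num1 out) := by unfold Spec_sumnum; infer_instance

-- ===== CLAIM (what is proved, stated in full; the proofs are below) =====
def Claim_equal_sumnum : Prop := ∀ (num1 : List String), Dom_sumnum num1 → Pre_sumnum num1 → Spec_sumnum num1 (sumnum num1)

-- ===== LEMMAS AND PROOFS =====

-- on a legal subtractive pair, roma2's entry is exactly the value difference
lemma r2_eq_sub (p c : Char) (h : roma2.contains [p, c] = true) : r2 p c = r1 c - r1 p := by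
  simp [roma2, PySem.Dict.contains, PySem.Dict.ofList, PySem.Dict.empty,
    PySem.Dict.update, PySem.Dict.insert] at h
  rcases h with ⟨h1, h2⟩ | ⟨h1, h2⟩ | ⟨h1, h2⟩ | ⟨h1, h2⟩ | ⟨h1, h2⟩ | ⟨h1, h2⟩ <;>
    (subst h1; subst h2; decide)

-- A's inner loop computes B's look-ahead value: with acc already containing r1 p for the
-- previous character p, the remaining scans agree up to the correction  - r1 p + rv (p :: rest)
lemma loopA_eq_rv (rest : List Char) (p : Char) (acc : Int)
    (h : romanOk (p :: rest) = true) : loopA rest p acc = acc - r1 p + rv (p :: rest) := by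
  induction rest generalizing p acc with
  | nil => simp [loopA, rv]
  | cons c rest ih =>
      simp only [romanOk, Bool.and_eq_true, Bool.or_eq_true, Bool.not_eq_true'] at h
      obtain ⟨⟨_, hpair⟩, htail⟩ := h
      have htail' : romanOk (c :: rest) = true := by
        cases rest <;> simpa [romanOk] using htail
      by_cases hle : r1 c ≤ r1 p
      · rw [loopA]
        simp only [hle, if_pos]
        rw [ih c _ htail', rv]
        have hnl : ¬ r1 p < r1 c := not_lt.mpr hle
        simp only [hnl, if_neg, not_false_iff]
        ring
      · have hlt : r1 p < r1 c := lt_of_not_ge hle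
        rw [loopA]
        simp only [hle, if_neg, not_false_iff]
        rcases hpair with hpair | hpair
        · exact absurd hlt (by simpa using hpair)
        · rw [ih c _ htail', r2_eq_sub p c hpair]
          conv_rhs => rw [rv]
          simp only [hlt, if_pos]
          ring

-- ===== VERDICT (by name: the statement is the Claim_ definition above) =====
theorem sumnum_spec : Claim_equal_sumnum := by
  intro num1 _ hpre
  obtain ⟨hlen, h0, h1⟩ := hpre
  match num1 with
  | a :: b :: tl =>
    have hb : PySem.List.pyGet? (a :: b :: tl) 1 = some b := by
      simp [PySem.List.pyGet?, PySem.List.pyIdx?]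
    simp only [PySem.List.pyGet?_zero_cons, Option.getD_some, hb] at h0 h1
    unfold Spec_sumnum sumnum sumnum_alt
    simp only [PySem.List.pyGet?_zero_cons, Option.getD_some, hb]
    obtain ⟨c0, t0, e0⟩ : ∃ c t, a.toList = c :: t := by
      cases e : a.toList with
      | nil => rw [e] at h0; simp [romanOk] at h0
      | cons x xs => exact ⟨x, xs, rfl⟩
    obtain ⟨c1, t1, e1⟩ : ∃ c t, b.toList = c :: t := by
      cases e : b.toList with
      | nil => rw [e] at h1; simp [romanOk] at h1
      | cons x xs => exact ⟨x, xs, rfl⟩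
    rw [e0, e1]
    rw [e0] at h0; rw [e1] at h1
    simp only [strA, List.headD]
    rw [loopA_eq_rv _ _ _ h0, loopA_eq_rv _ _ _ h1]
    ring
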